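-- pv_equiv track=rewrite | github.com/jaikwangg/Ai-Credit-Scoring | eval/run_eval.py | reorder_interleaved
-- ===== SOURCE A (Python) =====
-- from typing import Dict, Iterable, List, Optional, Set
--
-- def reorder_interleaved(entries: List[Dict]) -> List[Dict]:
--     """Reorder entries so the runner cycles through profiles for each question.
--
--     Default test set order is profile-major: P1Q1..P1Q10, P2Q1..P2Q10, ...
--     Interleaved order is question-major: P1Q1, P2Q1, ..., P10Q1, P1Q2, P2Q2, ...
--
--     Why: when a long run is interrupted at 17%, profile-major order means
--     only the first 1-2 profiles got tested, biasing results. Question-major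
--     order ensures all 10 profiles are touched after the first ~10 records.
--     """
--     by_q: Dict[str, List[Dict]] = {}
--     q_order: List[str] = []  # preserve original question order
--     for e in entries:
--         # use question text as key (stable across profiles)
--         q = e.get("question", "")
--         if q not in by_q:
--             by_q[q] = []
--             q_order.append(q)
--         by_q[q].append(e)
--
--     out: List[Dict] = []
--     for q in q_order:
--         out.extend(by_q[q])
--     return out
-- ===== SOURCE B (Python) =====
-- def reorder_interleaved(entries):
--     """Reorder entries to question-major order by repeatedly peeling off the
--     group of the first remaining question -- no dict of buckets needed."""
--     out = []
--     remaining = entries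
--     while remaining:
--         q = remaining[0].get("question", "")
--         out.extend(e for e in remaining if e.get("question", "") == q)
--         remaining = [e for e in remaining if e.get("question", "") != q]
--     return out
-- ===== Notes on version B (the rewrite author's own statement) =====
-- stated objective: alternative
-- what changed: Replaces the dict-of-buckets plus question-order list (build groups in one pass, then concatenate) with a repeated stable partition: peel off all entries sharing the first remaining entry's question, append them to the output, and continue on the rest -- no dictionary and no order list are maintained.
import Mathlib
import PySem

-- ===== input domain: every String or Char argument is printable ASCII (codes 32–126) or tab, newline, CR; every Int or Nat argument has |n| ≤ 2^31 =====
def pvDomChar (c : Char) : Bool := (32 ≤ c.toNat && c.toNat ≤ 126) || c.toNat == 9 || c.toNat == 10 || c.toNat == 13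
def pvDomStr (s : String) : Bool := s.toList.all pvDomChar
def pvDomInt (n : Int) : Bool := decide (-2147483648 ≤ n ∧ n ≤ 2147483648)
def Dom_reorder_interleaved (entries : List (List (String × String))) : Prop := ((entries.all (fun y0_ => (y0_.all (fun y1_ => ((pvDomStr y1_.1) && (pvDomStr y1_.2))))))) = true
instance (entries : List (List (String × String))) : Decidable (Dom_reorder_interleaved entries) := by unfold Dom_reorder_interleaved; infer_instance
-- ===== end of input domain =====

-- B replaces A's dict-of-buckets-plus-order-list with a repeated stable partition on the
-- first remaining question (alternative decomposition; return values proved equal).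

-- ===== PORT A =====
-- e.get("question", "") : first-match lookup in the association list (Python dict has unique keys)
def pvKey (e : List (String × String)) : String :=
  ((e.find? (fun p => p.1 == "question")).map Prod.snd).getD ""

-- the body of A's first loop: membership test, bucket creation, append
def pvStepA (st : PySem.Dict String (List (List (String × String))) × List String)
    (e : List (String × String)) :
    PySem.Dict String (List (List (String × String))) × List String :=
  let q := pvKey e
  let st' := if st.1.contains q then st else (st.1.insert q [], st.2 ++ [q])
  (st'.1.modify q [] (fun v => v ++ [e]), st'.2)

def reorder_interleaved (entries : List (List (String × String))) : List (List (String × String)) :=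
  let st := entries.foldl pvStepA (PySem.Dict.empty, [])
  st.2.foldl (fun out q => out ++ st.1.getD q []) []

-- ===== PORT B =====
-- B's while loop: accumulator `out`, shrink `remaining` by removing the first question's group
def pvAltLoop (out : List (List (String × String))) (remaining : List (List (String × String))) :
    List (List (String × String)) :=
  match remaining with
  | [] => out
  | e :: es =>
    pvAltLoop (out ++ (e :: es).filter (fun x => pvKey x == pvKey e))
      ((e :: es).filter (fun x => !(pvKey x == pvKey e)))
termination_by remaining.length
decreasing_by
  simp only [List.filter_cons, beq_self_eq_true, Bool.not_true, List.length_cons]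
  exact Nat.lt_succ_of_le (List.length_filter_le _ _)

def reorder_interleaved_alt (entries : List (List (String × String))) : List (List (String × String)) :=
  pvAltLoop [] entries

-- ===== PRECONDITION & SPEC =====
def Spec_reorder_interleaved (entries : List (List (String × String))) (out : List (List (String × String))) : Prop := out = reorder_interleaved_alt entries
instance (entries : List (List (String × String))) (out : List (List (String × String))) : Decidable (Spec_reorder_interleaved entries out) := by unfold Spec_reorder_interleaved; infer_instance

-- ===== CLAIM (what is proved, stated in full; the proofs are below) =====
def Claim_equal_reorder_interleaved : Prop := ∀ (entries : List (List (String × String))), Dom_reorder_interleaved entries → Spec_reorder_interleaved entries (reorder_interleaved entries)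

-- ===== LEMMAS AND PROOFS =====

-- first-occurrence dedup of a list of question keys
def pvFdx : List String → List String
  | [] => []
  | q :: qs => q :: pvFdx (qs.filter (fun x => !(x == q)))
termination_by l => l.length
decreasing_by
  simp only [List.length_unattach, List.length_cons]
  exact Nat.lt_succ_of_le ((List.length_filter_le _ _).trans (le_of_eq List.length_attach))

-- the common canonical form: concatenate, per first-occurrence question, that question's group
def pvCanon (l : List (List (String × String))) : List (List (String × String)) :=
  (pvFdx (l.map pvKey)).flatMap (fun q => l.filter (fun e => pvKey e == q))

-- A's incremental order list
def pvDAcc (ord : List String) : List String → List String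
  | [] => ord
  | q :: qs => pvDAcc (if q ∈ ord then ord else ord ++ [q]) qs

theorem pvFdx_subset_aux (n : Nat) : ∀ (ks : List String), ks.length ≤ n → ∀ x ∈ pvFdx ks, x ∈ ks := by
  induction n with
  | zero =>
    intro ks h x hx
    rw [List.eq_nil_of_length_eq_zero (Nat.le_zero.mp h)] at hx
    simp [pvFdx] at hx
  | succ n ih =>
    intro ks h x hx
    match ks with
    | [] => simp [pvFdx] at hx
    | q :: qs =>
      rw [pvFdx] at hx
      rcases List.mem_cons.mp hx with h1 | h1
      · simp [h1]
      · exact List.mem_cons_of_mem _ (List.mem_of_mem_filter (ih _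
          (le_trans (List.length_filter_le _ _) (Nat.le_of_succ_le_succ h)) _ h1))

theorem pvFdx_subset (ks : List String) (x : String) (h : x ∈ pvFdx ks) : x ∈ ks :=
  pvFdx_subset_aux ks.length ks le_rfl x h

theorem pvBucket (l : List (List (String × String)))
    (d : PySem.Dict String (List (List (String × String)))) (ord : List String) (q : String) :
    ((l.foldl pvStepA (d, ord)).1).getD q [] = d.getD q [] ++ l.filter (fun e => pvKey e == q) := by
  induction l generalizing d ord with
  | nil => simp
  | cons e l ih =>
    simp only [List.foldl_cons, List.filter_cons]
    rw [ih]
    simp only [pvStepA]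
    by_cases hq : q = pvKey e
    · subst hq
      by_cases hc : d.contains (pvKey e) = true
      · simp [hc, PySem.Dict.getD_modify_self, List.append_assoc]
      · simp only [Bool.not_eq_true] at hc
        simp [hc, PySem.Dict.getD_modify_self, PySem.Dict.getD_insert_self,
          PySem.Dict.getD_of_not_contains _ _ hc]
    · have hb : (pvKey e == q) = false := by
        simp only [beq_eq_false_iff_ne, ne_eq]
        exact fun h => hq h.symm
      have hmod : ∀ (d' : PySem.Dict String (List (List (String × String)))),
          (d'.modify (pvKey e) [] (fun v => v ++ [e])).getD q [] = d'.getD q [] :=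
        fun d' => PySem.Dict.getD_modify_of_ne d' _ _ hq
      by_cases hc : d.contains (pvKey e) = true
      · simp [hc, hb, hmod]
      · simp only [Bool.not_eq_true] at hc
        simp [hc, hb, hmod, PySem.Dict.getD_insert_of_ne d _ _ hq]

theorem pvOrd (l : List (List (String × String)))
    (d : PySem.Dict String (List (List (String × String)))) (ord : List String)
    (h : ∀ q, d.contains q = decide (q ∈ ord)) :
    (l.foldl pvStepA (d, ord)).2 = pvDAcc ord (l.map pvKey) := by
  induction l generalizing d ord with
  | nil => simp [pvDAcc]
  | cons e l ih =>
    simp only [List.foldl_cons, List.map_cons, pvDAcc, pvStepA]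
    by_cases hc : d.contains (pvKey e) = true
    · have hm : pvKey e ∈ ord := by have := h (pvKey e); rw [hc] at this; simpa using this.symm
      simp only [hc, if_true, hm]
      refine ih _ _ (fun q => ?_)
      rw [PySem.Dict.contains_modify, h q]
      by_cases hqe : q = pvKey e <;> simp [hqe, hm]
    · simp only [Bool.not_eq_true] at hc
      have hm : pvKey e ∉ ord := by
        have := h (pvKey e); rw [hc] at this
        intro hmem; simp [hmem] at this
      simp only [hc, Bool.false_eq_true, if_false, hm]
      refine ih _ _ (fun q => ?_)
      rw [PySem.Dict.contains_modify, PySem.Dict.contains_insert, h q]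
      by_cases hqe : q = pvKey e <;> simp [hqe, List.mem_append]

theorem pvDAcc_eq (ks : List String) (seen : List String) :
    pvDAcc seen ks = seen ++ pvFdx (ks.filter (fun x => !(decide (x ∈ seen)))) := by
  induction ks generalizing seen with
  | nil => simp [pvDAcc, pvFdx]
  | cons q qs ih =>
    simp only [pvDAcc, List.filter_cons]
    by_cases hm : q ∈ seen
    · simp only [hm, if_true, decide_true, Bool.not_true, Bool.false_eq_true, if_false]
      exact ih seen
    · simp only [hm, if_false, decide_false, Bool.not_false, if_true]
      rw [pvFdx, ih (seen ++ [q]), List.append_assoc, List.cons_append, List.nil_append,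
        List.filter_filter]
      congr 2
      congr 1
      apply List.filter_congr
      intro x _
      by_cases hx : x = q <;> simp [hx, List.mem_append]

theorem pvCanon_cons (e : List (String × String)) (es : List (List (String × String))) :
    pvCanon (e :: es) =
      (e :: es).filter (fun x => pvKey x == pvKey e) ++
        pvCanon ((e :: es).filter (fun x => !(pvKey x == pvKey e))) := by
  have hrest : (e :: es).filter (fun x => !(pvKey x == pvKey e))
      = es.filter (fun x => !(pvKey x == pvKey e)) := by
    simp
  rw [hrest]
  unfold pvCanon
  rw [List.map_cons, pvFdx, List.flatMap_cons]
  congr 1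
  rw [List.filter_map]
  simp only [Function.comp_def]
  apply List.flatMap_congr
  intro q' hq'
  have hq'ne : q' ≠ pvKey e := by
    have hmem := pvFdx_subset _ _ hq'
    rcases List.mem_map.mp hmem with ⟨x, hx, hkey⟩
    have hfe := List.of_mem_filter hx
    subst hkey
    simpa using hfe
  have hhead : (pvKey e == q') = false := by
    simp only [beq_eq_false_iff_ne, ne_eq]
    exact fun h => hq'ne h.symm
  rw [List.filter_cons]
  simp only [hhead, Bool.false_eq_true, if_false]
  rw [List.filter_filter]
  apply List.filter_congr
  intro x _
  by_cases hx : pvKey x = q'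
  · simp [hx, hq'ne]
  · simp [hx]

theorem pvA_eq_canon (l : List (List (String × String))) : reorder_interleaved l = pvCanon l := by
  unfold reorder_interleaved pvCanon
  rw [PySem.List.foldl_append_eq_flatMap]
  rw [pvOrd _ _ _ (fun q => by simp [PySem.Dict.contains_empty]),
    pvDAcc_eq, List.nil_append]
  simp only [List.not_mem_nil, decide_false, Bool.not_false, List.filter_true]
  apply List.flatMap_congr
  intro q _
  rw [pvBucket, PySem.Dict.getD_empty, List.nil_append]

theorem pvAltLoop_eq (n : Nat) (rem : List (List (String × String))) (hn : rem.length ≤ n)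
    (out : List (List (String × String))) : pvAltLoop out rem = out ++ pvCanon rem := by
  induction n generalizing rem out with
  | zero =>
    have : rem = [] := List.eq_nil_of_length_eq_zero (Nat.le_zero.mp hn)
    subst this
    simp [pvAltLoop, pvCanon, pvFdx]
  | succ n ih =>
    match rem with
    | [] => simp [pvAltLoop, pvCanon, pvFdx]
    | e :: es =>
      rw [pvAltLoop, ih _ (by
        simp only [List.filter_cons, beq_self_eq_true, Bool.not_true, Bool.false_eq_true, if_false]
        exact le_trans (List.length_filter_le _ _) (Nat.le_of_succ_le_succ hn)) _,
        pvCanon_cons, List.append_assoc]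

theorem pvAlt_eq_canon (l : List (List (String × String))) : pvAltLoop [] l = pvCanon l := by
  simpa using pvAltLoop_eq l.length l le_rfl []

-- ===== VERDICT (by name: the statement is the Claim_ definition above) =====
theorem reorder_interleaved_spec : Claim_equal_reorder_interleaved := by
  intro entries _
  unfold Spec_reorder_interleaved reorder_interleaved_alt
  rw [pvA_eq_canon, pvAlt_eq_canon]
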